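-- pv_equiv track=rewrite | github.com/elieltrindade/jogo-ZombieDice | Zombie_Dice.1.6.py | posicoes
-- ===== SOURCE A (Python) =====
-- def posicoes(a,b):
--     lista = []
--     for l in range(1, b + 1):
--         lista.append(l)
--     for l in range(0, b + 1):
--         for c in range(l, b):
--             if a[lista[l]][1] < a[lista[c]][1]:
--                 aux = lista[c]
--                 aux2 = lista[l]
--                 lista.pop(c)
--                 lista.insert(c, aux2)
--                 lista.pop(c)
--                 lista.insert(l, aux)
--     return lista
-- ===== SOURCE B (Python) =====
-- def posicoes(a, b):
--     # Python's sort is stable, and with reverse=True equal keys keep their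
--     # original (ascending-index) order -- exactly the order A's selection
--     # produces.
--     return sorted(range(1, b + 1), key=lambda i: a[i][1], reverse=True)
-- ===== Notes on version B (the rewrite author's own statement) =====
-- stated objective: faster
-- what changed: A's six-line pop/insert block is a stable descending selection sort of the index list [1..b] by the key a[i][1]; B replaces the quadratic selection with one stable library sort (sorted(..., key=..., reverse=True)).
import Mathlib
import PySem

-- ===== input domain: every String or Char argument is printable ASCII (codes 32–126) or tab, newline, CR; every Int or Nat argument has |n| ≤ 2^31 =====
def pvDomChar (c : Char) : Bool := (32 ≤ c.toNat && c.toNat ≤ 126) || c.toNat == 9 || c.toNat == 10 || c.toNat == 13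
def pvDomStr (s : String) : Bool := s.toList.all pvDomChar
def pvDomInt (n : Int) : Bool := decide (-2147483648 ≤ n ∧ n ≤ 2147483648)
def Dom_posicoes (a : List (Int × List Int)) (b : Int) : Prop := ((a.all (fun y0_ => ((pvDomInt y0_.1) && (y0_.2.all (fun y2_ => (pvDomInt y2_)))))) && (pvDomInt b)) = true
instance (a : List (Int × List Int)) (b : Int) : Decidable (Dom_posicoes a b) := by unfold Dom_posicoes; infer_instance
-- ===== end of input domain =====

-- B replaces A's quadratic selection-by-move sort of the index list [1..b]
-- (keyed by a[i][1]) with one stable library sort, reverse=True.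

-- ===== PORT A =====
-- the body of A's inner 'for c' loop: the comparison and the pop/insert block, step for step
def pvInnerBody (a : List (Int × List Int)) (l : Int) (lista : List Int) (c : Int) : List Int :=
  if (PySem.List.pyGetD a (PySem.List.pyGetD lista l 0) (0, [])).2 <
     (PySem.List.pyGetD a (PySem.List.pyGetD lista c 0) (0, [])).2 then
    -- Pre_posicoes makes every index below in range (Python raises outside it)
    let aux := PySem.List.pyGetD lista c 0
    let aux2 := PySem.List.pyGetD lista l 0
    let lista1 := ((PySem.List.pop? lista c).map Prod.snd).getD lista
    let lista2 := PySem.List.insert lista1 c aux2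
    let lista3 := ((PySem.List.pop? lista2 c).map Prod.snd).getD lista2
    PySem.List.insert lista3 l aux
  else lista

def posicoes (a : List (Int × List Int)) (b : Int) : List Int :=
  let lista := (PySem.List.pyRange 1 (b + 1)).foldl (fun lista l => lista ++ [l]) []
  (PySem.List.pyRange 0 (b + 1)).foldl
    (fun lista l => (PySem.List.pyRange l b).foldl (pvInnerBody a l) lista) lista

-- ===== PORT B =====
def posicoes_alt (a : List (Int × List Int)) (b : Int) : List Int :=
  PySem.List.sorted (PySem.List.pyRange 1 (b + 1))
    (fun i => (PySem.List.pyGetD a i (0, [])).2) true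

-- ===== PRECONDITION & SPEC =====
-- Pre_ excludes exactly the inputs where Python A raises IndexError: b ≥ 1 and b ≥ len(a)
-- (then some a[lista[c]] with lista[c] ∈ 1..b is out of range; B raises there too).
def Pre_posicoes (a : List (Int × List Int)) (b : Int) : Prop := b ≤ 0 ∨ b < (a.length : Int)
instance (a : List (Int × List Int)) (b : Int) : Decidable (Pre_posicoes a b) := by unfold Pre_posicoes; infer_instance

def pvWitness_posicoes : (List (Int × List Int)) × Int := ([(0, [1]), (7, [2, 0]), (1, [2])], 2)

def Spec_posicoes (a : List (Int × List Int)) (b : Int) (out : List Int) : Prop := out = posicoes_alt a b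
instance (a : List (Int × List Int)) (b : Int) (out : List Int) : Decidable (Spec_posicoes a b out) := by unfold Spec_posicoes; infer_instance

-- ===== CLAIM (what is proved, stated in full; the proofs are below) =====
def Claim_equal_posicoes : Prop := ∀ (a : List (Int × List Int)) (b : Int), Dom_posicoes a b → Pre_posicoes a b → Spec_posicoes a b (posicoes a b)

-- ===== LEMMAS AND PROOFS =====

-- the key A sorts by: K i = a[i][1] (as both ports read it)
def pvK (a : List (Int × List Int)) : Int → List Int := fun i => (PySem.List.pyGetD a i (0, [])).2

-- structural description of one pass of A's inner loop over the segment: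
-- state (cur, pre, rest) stands for the actual list segment cur :: pre ++ rest
def pvSel (K : Int → List Int) : Int → List Int → List Int → Int × List Int
  | cur, pre, [] => (cur, pre)
  | cur, pre, x :: rest =>
      if K cur < K x then pvSel K x (cur :: pre) rest else pvSel K cur (pre ++ [x]) rest

lemma pvSel_len (K : Int → List Int) :
    ∀ rest cur pre, (pvSel K cur pre rest).2.length = pre.length + rest.length := by
  intro rest
  induction rest with
  | nil => intro cur pre; simp [pvSel]
  | cons x rest ih =>
      intro cur pre
      simp only [pvSel]
      split
      · rw [ih]; simp; omega
      · rw [ih]; simp; omega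

-- A's outer loop, structurally: repeatedly select with pvSel
def pvOuter (K : Int → List Int) : List Int → List Int
  | [] => []
  | x :: xs => (pvSel K x [] xs).1 :: pvOuter K (pvSel K x [] xs).2
termination_by l => l.length
decreasing_by
  have := pvSel_len K xs x []
  simp at this ⊢; omega

lemma pvIns_front (K : Int → List Int) (x : Int) (acc : List Int)
    (h : ∀ y ∈ acc, K y < K x) :
    PySem.List.insertBy (fun p q => decide (K q < K p)) x acc = x :: acc := by
  cases acc with
  | nil => rfl
  | cons y ys =>
      have : K y < K x := h y (by simp)
      simp [PySem.List.insertBy, this]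

lemma pvIns_cons (K : Int → List Int) (h0 y : Int) (acc : List Int)
    (h : ¬ K h0 < K y) :
    PySem.List.insertBy (fun p q => decide (K q < K p)) y (h0 :: acc)
      = h0 :: PySem.List.insertBy (fun p q => decide (K q < K p)) y acc := by
  simp [PySem.List.insertBy, h]

lemma pvFold_head (K : Int → List Int) :
    ∀ (p : List Int) (h0 : Int) (A : List Int), (∀ y ∈ p, K y ≤ K h0) →
    p.foldl (fun acc x => PySem.List.insertBy (fun p q => decide (K q < K p)) x acc) (h0 :: A)
      = h0 :: p.foldl (fun acc x => PySem.List.insertBy (fun p q => decide (K q < K p)) x acc) A := by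
  intro p
  induction p with
  | nil => intro h0 A _; rfl
  | cons y p ih =>
      intro h0 A h
      simp only [List.foldl_cons]
      rw [pvIns_cons K h0 y A (not_lt.mpr (h y (by simp)))]
      exact ih h0 _ (fun z hz => h z (by simp [hz]))

lemma pvSorted_cons_max (K : Int → List Int) (h0 : Int) (t : List Int)
    (h : ∀ y ∈ t, K y ≤ K h0) :
    PySem.List.sorted (h0 :: t) K true = h0 :: PySem.List.sorted t K true := by
  rw [PySem.List.sorted_rev_eq_foldl_insertBy, PySem.List.sorted_rev_eq_foldl_insertBy]
  simp only [List.foldl_cons]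
  exact pvFold_head K t h0 [] h

-- moving a strictly dominant element past smaller ones does not change the stable sort
lemma pvSorted_swap (K : Int → List Int) (p : List Int) (x : Int) (r : List Int)
    (h : ∀ y ∈ p, K y < K x) :
    PySem.List.sorted (p ++ x :: r) K true = PySem.List.sorted (x :: (p ++ r)) K true := by
  rw [PySem.List.sorted_rev_eq_foldl_insertBy, PySem.List.sorted_rev_eq_foldl_insertBy]
  rw [List.foldl_append]
  simp only [List.foldl_cons]
  have hP : List.foldl (fun acc x => PySem.List.insertBy (fun p q => decide (K q < K p)) x acc) [] p
      = PySem.List.sorted p K true := (PySem.List.sorted_rev_eq_foldl_insertBy p K).symm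
  rw [show (PySem.List.insertBy (fun p q => decide (K q < K p)) x
        (List.foldl (fun acc x => PySem.List.insertBy (fun p q => decide (K q < K p)) x acc) [] p))
      = x :: List.foldl (fun acc x => PySem.List.insertBy (fun p q => decide (K q < K p)) x acc) [] p from by
    apply pvIns_front
    intro y hy
    rw [hP] at hy
    exact h y ((PySem.List.mem_sorted _ _ _ _).mp hy)]
  rw [show (PySem.List.insertBy (fun p q => decide (K q < K p)) x ([] : List Int)) = [x] from rfl]
  rw [List.foldl_append]
  rw [pvFold_head K p x [] (fun y hy => le_of_lt (h y hy))]

-- the pass invariant: stable sort of the segment = selected max :: stable sort of the rest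
lemma pvSel_sorted (K : Int → List Int) :
    ∀ (rest : List Int) (cur : Int) (pre : List Int), (∀ y ∈ pre, K y ≤ K cur) →
    PySem.List.sorted (cur :: (pre ++ rest)) K true
      = (pvSel K cur pre rest).1 :: PySem.List.sorted (pvSel K cur pre rest).2 K true := by
  intro rest
  induction rest with
  | nil =>
      intro cur pre h
      simpa [pvSel] using pvSorted_cons_max K cur pre h
  | cons x rest ih =>
      intro cur pre h
      simp only [pvSel]
      by_cases hx : K cur < K x
      · rw [if_pos hx]
        have hswap := pvSorted_swap K (cur :: pre) x rest
          (by intro y hy; rcases List.mem_cons.mp hy with rfl | hy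
              · exact hx
              · exact lt_of_le_of_lt (h y hy) hx)
        have hih := ih x (cur :: pre)
          (by intro y hy; rcases List.mem_cons.mp hy with rfl | hy
              · exact le_of_lt hx
              · exact le_trans (h y hy) (le_of_lt hx))
        have : PySem.List.sorted (cur :: (pre ++ x :: rest)) K true
            = PySem.List.sorted (x :: ((cur :: pre) ++ rest)) K true := by
          simpa using hswap
        rw [this, hih]
      · rw [if_neg hx]
        have hih := ih cur (pre ++ [x])
          (by intro y hy
              rcases List.mem_append.mp hy with hy | hy
              · exact h y hy
              · simp at hy; subst hy; exact not_lt.mp hx)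
        simpa using hih

lemma pvOuter_sorted (K : Int → List Int) :
    ∀ seg : List Int, pvOuter K seg = PySem.List.sorted seg K true := by
  intro seg
  induction seg using pvOuter.induct K with
  | case1 => simp [pvOuter, PySem.List.sorted]
  | case2 x xs ih =>
      rw [pvOuter]
      have h := pvSel_sorted K xs x [] (by simp)
      simp only [List.nil_append] at h
      rw [ih, ← h]

-- ----- index plumbing -----

lemma pvRange_nil (s t : Int) (h : t ≤ s) : PySem.List.pyRange s t = [] := by
  simp [PySem.List.pyRange]
  intro h2; omega

lemma pvRange_len (s t : Int) : (PySem.List.pyRange s t).length = (t - s).toNat := by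
  simp [PySem.List.pyRange]
  intro h; omega

lemma pvEraseAt {α : Type} (u : List α) (x : α) (v : List α) :
    List.eraseIdx (u ++ x :: v) u.length = u ++ v := by
  induction u with
  | nil => rfl
  | cons a u ih => simpa [List.eraseIdx] using ih

lemma pvGetAt (u : List Int) (x : Int) (v : List Int) (d : Int) :
    PySem.List.pyGetD (u ++ x :: v) (u.length : Int) d = x := by
  rw [PySem.List.pyGetD_natCast]
  simp [List.getD]

lemma pvPopAt (u : List Int) (x : Int) (v : List Int) :
    PySem.List.pop? (u ++ x :: v) (u.length : Int) = some (x, u ++ v) := by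
  rw [PySem.List.pop?_natCast _ _ (by simp)]
  rw [pvEraseAt]
  simp

lemma pvInsertAt (u v : List Int) (x : Int) :
    PySem.List.insert (u ++ v) (u.length : Int) x = u ++ x :: v := by
  simp only [PySem.List.insert, PySem.List.sliceIndices]
  norm_num
  rw [if_neg (by omega : ¬ ((u.length : Int) < 0))]
  simp

-- one full pass of the inner loop, from position done.length+1+pre.length on
lemma pvInner_loop (a : List (Int × List Int)) :
    ∀ (rest : List Int) (cur : Int) (pre done : List Int) (n : Nat),
    n = done.length + 1 + pre.length + rest.length →
    (PySem.List.pyRange ((done.length + 1 + pre.length : Nat) : Int) (n : Int)).foldl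
        (pvInnerBody a (done.length : Int)) (done ++ cur :: (pre ++ rest))
      = done ++ (pvSel (pvK a) cur pre rest).1 :: (pvSel (pvK a) cur pre rest).2 := by
  intro rest
  induction rest with
  | nil =>
      intro cur pre done n hn
      simp only [List.length_nil, Nat.add_zero] at hn
      rw [pvRange_nil _ _ (by exact_mod_cast (by omega : n ≤ done.length + 1 + pre.length))]
      simp [pvSel]
  | cons x rest ih =>
      intro cur pre done n hn
      simp only [List.length_cons] at hn
      rw [PySem.List.pyRange_one_cons
        (by exact_mod_cast (by omega : done.length + 1 + pre.length < n))]
      rw [List.foldl_cons]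
      have hm : ((done.length + 1 + pre.length : Nat) : Int) = ((done ++ cur :: pre).length : Int) := by
        simp only [List.length_append, List.length_cons]; push_cast; omega
      have e1 : PySem.List.pyGetD (done ++ cur :: (pre ++ x :: rest)) ((done.length : Nat) : Int) 0 = cur :=
        pvGetAt done cur (pre ++ x :: rest) 0
      have e2 : PySem.List.pyGetD (done ++ cur :: (pre ++ x :: rest)) ((done.length + 1 + pre.length : Nat) : Int) 0 = x := by
        rw [hm, show done ++ cur :: (pre ++ x :: rest) = (done ++ cur :: pre) ++ x :: rest by simp]
        exact pvGetAt (done ++ cur :: pre) x rest 0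
      have hbody : pvInnerBody a ((done.length : Nat) : Int) (done ++ cur :: (pre ++ x :: rest))
            ((done.length + 1 + pre.length : Nat) : Int)
          = if (PySem.List.pyGetD a cur (0, [])).2 < (PySem.List.pyGetD a x (0, [])).2
            then done ++ x :: ((cur :: pre) ++ rest)
            else done ++ cur :: (pre ++ x :: rest) := by
        simp only [pvInnerBody, e1, e2]
        by_cases hx : (PySem.List.pyGetD a cur (0, [])).2 < (PySem.List.pyGetD a x (0, [])).2
        · rw [if_pos hx, if_pos hx]
          rw [show done ++ cur :: (pre ++ x :: rest) = (done ++ cur :: pre) ++ x :: rest by simp, hm,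
              pvPopAt (done ++ cur :: pre) x rest]
          simp only [Option.map_some, Option.getD_some]
          rw [pvInsertAt (done ++ cur :: pre) rest cur,
              pvPopAt (done ++ cur :: pre) cur rest]
          simp only [Option.map_some, Option.getD_some]
          rw [show (done ++ cur :: pre) ++ rest = done ++ (cur :: pre ++ rest) by simp,
              pvInsertAt done (cur :: pre ++ rest) x]
        · rw [if_neg hx, if_neg hx]
      rw [hbody]
      by_cases hx : (PySem.List.pyGetD a cur (0, [])).2 < (PySem.List.pyGetD a x (0, [])).2
      · rw [if_pos hx]
        rw [show ((done.length + 1 + pre.length : Nat) : Int) + 1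
              = ((done.length + 1 + (cur :: pre).length : Nat) : Int) by
                simp only [List.length_cons]; push_cast; omega]
        rw [ih x (cur :: pre) done n (by simp only [List.length_cons]; omega)]
        simp only [pvSel]
        rw [if_pos (show pvK a cur < pvK a x from hx)]
      · rw [if_neg hx]
        rw [show ((done.length + 1 + pre.length : Nat) : Int) + 1
              = ((done.length + 1 + (pre ++ [x]).length : Nat) : Int) by
                simp only [List.length_append, List.length_cons, List.length_nil]; push_cast; omega]
        rw [show done ++ cur :: (pre ++ x :: rest) = done ++ cur :: ((pre ++ [x]) ++ rest) by simp]
        rw [ih cur (pre ++ [x]) done n (by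
          simp only [List.length_append, List.length_cons, List.length_nil]; omega)]
        simp only [pvSel]
        rw [if_neg (show ¬ pvK a cur < pvK a x from hx)]

-- the outer loop, starting with the prefix `done` already in final position
lemma pvOuter_loop (a : List (Int × List Int)) :
    ∀ (seg done : List Int) (n : Nat), n = done.length + seg.length →
    (PySem.List.pyRange ((done.length : Nat) : Int) ((n : Int) + 1)).foldl
        (fun lista l => (PySem.List.pyRange l (n : Int)).foldl (pvInnerBody a l) lista)
        (done ++ seg)
      = done ++ pvOuter (pvK a) seg := by
  intro seg
  induction seg using pvOuter.induct (pvK a) with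
  | case1 =>
      intro done n hn
      simp only [List.length_nil, Nat.add_zero] at hn
      subst hn
      rw [PySem.List.pyRange_one_cons (by omega : ((done.length : Nat) : Int) < (done.length : Int) + 1)]
      rw [pvRange_nil ((done.length : Int) + 1) ((done.length : Int) + 1) le_rfl]
      rw [List.foldl_cons, List.foldl_nil]
      rw [pvRange_nil ((done.length : Nat) : Int) ((done.length : Nat) : Int) le_rfl]
      simp [pvOuter]
  | case2 x xs ih =>
      intro done n hn
      simp only [List.length_cons] at hn
      rw [PySem.List.pyRange_one_cons
        (by exact_mod_cast (by omega : (done.length : Int) < (n : Int) + 1))]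
      rw [List.foldl_cons]
      -- the first inner iteration (c = l) compares lista[l] with itself: no-op
      rw [show PySem.List.pyRange ((done.length : Nat) : Int) (n : Int)
            = ((done.length : Nat) : Int) :: PySem.List.pyRange (((done.length : Nat) : Int) + 1) (n : Int) from
          PySem.List.pyRange_one_cons (by exact_mod_cast (by omega : done.length < n))]
      rw [List.foldl_cons]
      rw [show pvInnerBody a ((done.length : Nat) : Int) (done ++ x :: xs) ((done.length : Nat) : Int)
            = done ++ x :: xs from by
        simp only [pvInnerBody, pvGetAt done x xs 0]
        rw [if_neg (lt_irrefl _)]]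
      have hinner := pvInner_loop a xs x [] done n (by simpa using (by omega : n = done.length + 1 + xs.length))
      simp only [List.length_nil, Nat.add_zero, List.nil_append] at hinner
      rw [show ((done.length : Nat) : Int) + 1 = ((done.length + 1 + 0 : Nat) : Int) by push_cast; omega]
      rw [hinner]
      have houter := ih (done ++ [(pvSel (pvK a) x [] xs).1]) n
        (by simp only [List.length_append, List.length_cons, List.length_nil, pvSel_len]; omega)
      simp only [List.length_append, List.length_cons, List.length_nil] at houter
      rw [show done ++ (pvSel (pvK a) x [] xs).1 :: (pvSel (pvK a) x [] xs).2
            = (done ++ [(pvSel (pvK a) x [] xs).1]) ++ (pvSel (pvK a) x [] xs).2 by simp]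
      rw [show ((done.length + 1 + 0 : Nat) : Int) = ((done.length + (0 + 1) : Nat) : Int) by norm_num]
      rw [houter]
      rw [pvOuter]
      simp

-- ===== VERDICT (by name: the statement is the Claim_ definition above) =====
theorem posicoes_spec : Claim_equal_posicoes := by
  intro a b _ _
  unfold Spec_posicoes posicoes posicoes_alt
  simp only [PySem.List.foldl_append_singleton, List.nil_append]
  by_cases hb : b < 0
  · rw [pvRange_nil 1 (b + 1) (by omega), pvRange_nil 0 (b + 1) (by omega)]
    rfl
  · rw [Int.not_lt] at hb
    obtain ⟨n, hn⟩ : ∃ n : Nat, b = (n : Int) := ⟨b.toNat, (Int.toNat_of_nonneg (by omega)).symm⟩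
    subst hn
    have hlen : (PySem.List.pyRange 1 ((n : Int) + 1)).length = n := by
      rw [pvRange_len]; omega
    have h := pvOuter_loop a (PySem.List.pyRange 1 ((n : Int) + 1)) [] n (by simp [hlen])
    simp only [List.length_nil, Nat.cast_zero, List.nil_append] at h
    rw [h, pvOuter_sorted]
    rfl
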